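-- pv_equiv track=rewrite | github.com/brb45/Desk_2 | proc_lt_std.py | helper
-- ===== SOURCE A (Python) =====
-- def helper(str, k):
--     i, j = 0, len(str)-1
--     while i < j:
--         if i == k:
--             i += 1
--         if j == k:
--             j -= 1
--         if str[i] != str[j]:
--             return False
--         i += 1
--         j -= 1
--     return True
-- ===== SOURCE B (Python) =====
-- def helper(str, k):
--     chars = [c for idx, c in enumerate(str) if idx != k]
--     return chars == chars[::-1]
-- ===== Notes on version B (the rewrite author's own statement) =====
-- stated objective: simpler
-- what changed: Replaces the in-place two-pointer scan with explicit skip-index bookkeeping by building the list of characters whose index is not k and comparing it with its reverse.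
import Mathlib
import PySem

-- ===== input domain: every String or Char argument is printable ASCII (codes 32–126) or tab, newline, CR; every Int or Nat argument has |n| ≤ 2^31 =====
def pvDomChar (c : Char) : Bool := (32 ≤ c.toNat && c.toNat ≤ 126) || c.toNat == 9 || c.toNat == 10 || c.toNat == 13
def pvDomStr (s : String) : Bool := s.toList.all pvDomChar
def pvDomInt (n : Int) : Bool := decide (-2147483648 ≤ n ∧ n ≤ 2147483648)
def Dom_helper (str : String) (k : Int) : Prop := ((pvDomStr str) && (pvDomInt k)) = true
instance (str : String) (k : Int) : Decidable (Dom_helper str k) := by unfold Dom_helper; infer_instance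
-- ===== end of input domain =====

-- B replaces A's two-pointer scan with explicit skip-index bookkeeping by a simpler
-- construct-then-reverse-compare: keep the characters at indices ≠ k, compare to the reverse.

-- ===== PORT A =====
-- the while loop of A: state (i, j); the three in-loop ifs in order
def helperLoop (l : List Char) (k i j : Int) : Bool :=
  if i < j then
    let i' := if i = k then i + 1 else i
    let j' := if j = k then j - 1 else j
    -- str[i] != str[j]; on A's reachable states the indices are in range, pyGet? is exact
    if PySem.List.pyGet? l i' ≠ PySem.List.pyGet? l j' then false
    else helperLoop l k (i' + 1) (j' - 1)
  else true
  termination_by (j - i).toNat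
  decreasing_by split_ifs <;> omega

def helper (str : String) (k : Int) : Bool :=
  helperLoop str.toList k 0 (PySem.Str.len str - 1)

-- ===== PORT B =====
def helper_alt (str : String) (k : Int) : Bool :=
  -- chars = [c for idx, c in enumerate(str) if idx != k]
  let chars := ((PySem.List.enumerate str.toList 0).filter (fun p => p.1 != k)).map Prod.snd
  -- chars == chars[::-1]  (PySem.List.slice?_none_none_neg_one: [::-1] is reverse)
  chars == chars.reverse

-- ===== PRECONDITION & SPEC =====
def Spec_helper (str : String) (k : Int) (out : Bool) : Prop := out = helper_alt str k
instance (str : String) (k : Int) (out : Bool) : Decidable (Spec_helper str k out) := by unfold Spec_helper; infer_instance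

-- ===== CLAIM =====
def Claim_equal_helper : Prop := ∀ (str : String) (k : Int), Dom_helper str k → Spec_helper str k (helper str k)

-- ===== LEMMAS AND PROOFS =====

-- one-step unfolding of helperLoop with the lets expanded
theorem helperLoop_eq (l : List Char) (k i j : Int) :
    helperLoop l k i j =
      if i < j then
        if PySem.List.pyGet? l (if i = k then i + 1 else i)
            ≠ PySem.List.pyGet? l (if j = k then j - 1 else j) then false
        else helperLoop l k ((if i = k then i + 1 else i) + 1) ((if j = k then j - 1 else j) - 1)
      else true := by
  rw [helperLoop]

-- A's loop with the k-guards stripped (proof device): plain two-pointer palindrome scan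
def plainLoop (l : List Char) (i j : Int) : Bool :=
  if i < j then
    if PySem.List.pyGet? l i ≠ PySem.List.pyGet? l j then false
    else plainLoop l (i + 1) (j - 1)
  else true
  termination_by (j - i).toNat
  decreasing_by omega

-- the filtered sequence B builds, in closed form
theorem filt_enumerate (k : Int) : ∀ (l : List Char) (s : Int),
    ((PySem.List.enumerate l s).filter (fun p => p.1 != k)).map Prod.snd
      = if s ≤ k ∧ k < s + l.length then l.eraseIdx (k - s).toNat else l := by
  intro l
  induction l with
  | nil => intro s; simp
  | cons x xs ih =>
    intro s
    rw [PySem.List.enumerate_cons]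
    by_cases hs : s = k
    · have h1 : ((s, x) :: PySem.List.enumerate xs (s + 1)).filter (fun p => p.1 != k)
          = (PySem.List.enumerate xs (s + 1)).filter (fun p => p.1 != k) := by
        simp [List.filter_cons, hs]
      rw [h1, ih (s + 1)]
      have hc : ¬ (s + 1 ≤ k ∧ k < s + 1 + (xs.length : Int)) := by omega
      have hc2 : s ≤ k ∧ k < s + ((x :: xs).length : Int) := by
        simp only [List.length_cons]; push_cast; omega
      rw [if_neg hc, if_pos hc2]
      have hz : (k - s).toNat = 0 := by omega
      rw [hz]
      rfl
    · have h1 : ((s, x) :: PySem.List.enumerate xs (s + 1)).filter (fun p => p.1 != k)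
          = (s, x) :: (PySem.List.enumerate xs (s + 1)).filter (fun p => p.1 != k) := by
        simp [List.filter_cons, hs]
      rw [h1]
      simp only [List.map_cons, ih (s + 1)]
      by_cases h2 : s + 1 ≤ k ∧ k < s + 1 + (xs.length : Int)
      · have h3 : s ≤ k ∧ k < s + ((x :: xs).length : Int) := by
          simp only [List.length_cons]; push_cast; omega
        rw [if_pos h2, if_pos h3]
        have hk : (k - s).toNat = ((k - (s + 1)).toNat) + 1 := by omega
        rw [hk]
        rfl
      · have h3 : ¬ (s ≤ k ∧ k < s + ((x :: xs).length : Int)) := by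
          simp only [List.length_cons] at *; push_cast at *; omega
        rw [if_neg h2, if_neg h3]

-- characterization of the plain two-pointer scan
theorem plainLoop_iff (l : List Char) : ∀ (i j : Int), 0 ≤ i → i + j = (l.length : Int) - 1 →
    (plainLoop l i j = true ↔
      ∀ a b : Int, i ≤ a → a < b → b ≤ j → a + b = (l.length : Int) - 1 →
        PySem.List.pyGet? l a = PySem.List.pyGet? l b) := by
  intro i j
  induction i, j using plainLoop.induct l with
  | case1 i j hij hne =>
    intro h0 hsum
    rw [plainLoop]
    simp only [if_pos hij, if_pos hne, Bool.false_eq_true, false_iff]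
    intro h
    exact hne (h i j le_rfl hij le_rfl hsum)
  | case2 i j hij hne ih =>
    intro h0 hsum
    rw [plainLoop]
    simp only [if_pos hij, if_neg hne]
    rw [ih (by omega) (by omega)]
    push_neg at hne
    constructor
    · intro h a b ha hab hb hs
      by_cases hai : a = i
      · have hbj : b = j := by omega
        subst hai hbj; exact hne
      · exact h a b (by omega) hab (by omega) hs
    · intro h a b ha hab hb hs
      exact h a b (by omega) hab (by omega) hs
  | case3 i j hij =>
    intro h0 hsum
    rw [plainLoop]
    simp only [if_neg hij, true_iff]
    intro a b ha hab hb _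
    omega

theorem pal_iff_pairs (l : List Char) :
    (l = l.reverse) ↔
      ∀ a b : Int, 0 ≤ a → a < b → b ≤ (l.length : Int) - 1 → a + b = (l.length : Int) - 1 →
        PySem.List.pyGet? l a = PySem.List.pyGet? l b := by
  constructor
  · intro hpal a b ha hab hb hsum
    have hrev : l[a.toNat]? = l.reverse[a.toNat]? := by rw [← hpal]
    rw [List.getElem?_reverse (by omega)] at hrev
    rw [show l.length - 1 - a.toNat = b.toNat from by omega] at hrev
    rw [PySem.List.pyGet?_of_nonneg _ ha, PySem.List.pyGet?_of_nonneg _ (by omega : (0:Int) ≤ b)]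
    exact hrev
  · intro h
    refine List.ext_getElem (by simp) ?_
    intro p h1 h2
    simp only [List.getElem_reverse]
    rcases lt_trichotomy p (l.length - 1 - p) with hlt | heq | hgt
    · have hh := h (p : Int) ((l.length : Int) - 1 - p) (by omega) (by omega) (by omega) (by omega)
      rw [PySem.List.pyGet?_eq_some_getElem l (by omega) (by omega),
          PySem.List.pyGet?_eq_some_getElem l (by omega) (by omega)] at hh
      simp only [Option.some_inj] at hh
      convert hh using 2 <;> omega
    · simp only [show l.length - 1 - p = p from by omega]
    · have hh := h ((l.length : Int) - 1 - p) (p : Int) (by omega) (by omega) (by omega) (by omega)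
      rw [PySem.List.pyGet?_eq_some_getElem l (by omega) (by omega),
          PySem.List.pyGet?_eq_some_getElem l (by omega) (by omega)] at hh
      simp only [Option.some_inj] at hh
      convert hh.symm using 2 <;> omega

theorem plainLoop_pal (l : List Char) :
    plainLoop l 0 ((l.length : Int) - 1) = (l == l.reverse) := by
  rw [Bool.eq_iff_iff, beq_iff_eq, plainLoop_iff l 0 ((l.length : Int) - 1) le_rfl (by omega)]
  exact (pal_iff_pairs l).symm

-- out-of-range k: the k-guards in A's loop never fire
theorem helperLoop_of_out (l : List Char) (k : Int)
    (hk : k < 0 ∨ (l.length : Int) ≤ k) : ∀ (n : Nat) (i j : Int),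
    (j - i).toNat ≤ n → 0 ≤ i → j ≤ (l.length : Int) - 1 →
    helperLoop l k i j = plainLoop l i j := by
  intro n
  induction n with
  | zero =>
    intro i j hn h0 hj
    rw [helperLoop_eq, plainLoop, if_neg (by omega), if_neg (by omega)]
  | succ n ih =>
    intro i j hn h0 hj
    by_cases hij : i < j
    · have hik : ¬ i = k := by omega
      have hjk : ¬ j = k := by omega
      rw [helperLoop_eq, plainLoop, if_pos hij, if_pos hij, if_neg hik, if_neg hjk]
      by_cases hC : PySem.List.pyGet? l i = PySem.List.pyGet? l j
      · rw [if_neg (fun h => h hC), if_neg (fun h => h hC)]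
        exact ih (i + 1) (j - 1) (by omega) (by omega) (by omega)
      · rw [if_pos hC, if_pos hC]
    · rw [helperLoop_eq, plainLoop, if_neg hij, if_neg hij]

-- index maps for in-range k: position of A's i (resp. j) pointer inside l.eraseIdx k
def phiI (k i : Int) : Int := if i ≤ k then i else i - 1
def phiJ (k j : Int) : Int := if j < k then j else j - 1

theorem eraseIdx_pyGet? (l : List Char) (k : Int) (hk0 : 0 ≤ k)
    (a : Int) (h0 : 0 ≤ a) :
    PySem.List.pyGet? (l.eraseIdx k.toNat) a
      = PySem.List.pyGet? l (if a < k then a else a + 1) := by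
  rw [PySem.List.pyGet?_of_nonneg _ h0, List.getElem?_eraseIdx]
  split_ifs with h1 h2
  · rw [PySem.List.pyGet?_of_nonneg l h0]
  · omega
  · omega
  · rw [PySem.List.pyGet?_of_nonneg l (by omega)]
    have h3 : (a + 1).toNat = a.toNat + 1 := by omega
    rw [h3]

theorem getI (l : List Char) (k : Int) (hk0 : 0 ≤ k) (i : Int) (h0 : 0 ≤ i) :
    PySem.List.pyGet? (l.eraseIdx k.toNat) (phiI k i)
      = PySem.List.pyGet? l (if i = k then i + 1 else i) := by
  rw [eraseIdx_pyGet? l k hk0 (phiI k i) (by unfold phiI; split_ifs <;> omega)]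
  congr 1
  unfold phiI
  split_ifs <;> omega

theorem getJ (l : List Char) (k : Int) (hk0 : 0 ≤ k) (j : Int) (h0 : 0 < j) :
    PySem.List.pyGet? (l.eraseIdx k.toNat) (phiJ k j)
      = PySem.List.pyGet? l (if j = k then j - 1 else j) := by
  rw [eraseIdx_pyGet? l k hk0 (phiJ k j) (by unfold phiJ; split_ifs <;> omega)]
  congr 1
  unfold phiJ
  split_ifs <;> omega

-- in-range k: A's loop on l tracks the plain loop on l.eraseIdx k through phiI/phiJ
theorem helperLoop_of_in (l : List Char) (k : Int) (hk0 : 0 ≤ k) : ∀ (n : Nat) (i j : Int),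
    (j - i).toNat ≤ n → 0 ≤ i →
    helperLoop l k i j = plainLoop (l.eraseIdx k.toNat) (phiI k i) (phiJ k j) := by
  intro n
  induction n with
  | zero =>
    intro i j hn h0
    have hφ : ¬ phiI k i < phiJ k j := by unfold phiI phiJ; split_ifs <;> omega
    rw [helperLoop_eq, plainLoop, if_neg (by omega), if_neg hφ]
  | succ n ih =>
    intro i j hn h0
    by_cases hij : i < j
    · by_cases hexc : (i = k ∧ j = k + 1) ∨ (i = k - 1 ∧ j = k)
      · -- the two boundary states: both sides are immediately true
        rcases hexc with ⟨hi, hj⟩ | ⟨hi, hj⟩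
        · have hsame : i + 1 = j := by omega
          rw [helperLoop_eq, if_pos hij, if_pos hi, if_neg (show ¬ j = k by omega), hsame,
              if_neg (fun h => h rfl), helperLoop_eq, if_neg (by omega),
              plainLoop, if_neg (by unfold phiI phiJ; split_ifs <;> omega)]
        · have hsame : i = j - 1 := by omega
          rw [helperLoop_eq, if_pos hij, if_neg (show ¬ i = k by omega), if_pos hj, hsame,
              if_neg (fun h => h rfl), helperLoop_eq, if_neg (by omega),
              plainLoop, if_neg (by unfold phiI phiJ; split_ifs <;> omega)]
      · have hφ : phiI k i < phiJ k j := by unfold phiI phiJ; split_ifs <;> omega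
        have hi' := getI l k hk0 i h0
        have hj' := getJ l k hk0 j (by omega)
        rw [helperLoop_eq, if_pos hij, plainLoop, if_pos hφ, hi', hj']
        by_cases hC : PySem.List.pyGet? l (if i = k then i + 1 else i)
            = PySem.List.pyGet? l (if j = k then j - 1 else j)
        · have hne' : ¬ (PySem.List.pyGet? l (if i = k then i + 1 else i)
              ≠ PySem.List.pyGet? l (if j = k then j - 1 else j)) := fun h => h hC
          rw [if_neg hne', if_neg hne']
          have e1 : phiI k ((if i = k then i + 1 else i) + 1) = phiI k i + 1 := by
            unfold phiI; split_ifs <;> omega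
          have e2 : phiJ k ((if j = k then j - 1 else j) - 1) = phiJ k j - 1 := by
            unfold phiJ; split_ifs <;> omega
          rw [ih ((if i = k then i + 1 else i) + 1) ((if j = k then j - 1 else j) - 1)
              (by split_ifs <;> omega) (by split_ifs <;> omega), e1, e2]
        · rw [if_pos hC, if_pos hC]
    · have hφ : ¬ phiI k i < phiJ k j := by unfold phiI phiJ; split_ifs <;> omega
      rw [helperLoop_eq, plainLoop, if_neg hij, if_neg hφ]

-- ===== VERDICT =====
theorem helper_spec : Claim_equal_helper := by
  intro str k _
  unfold Spec_helper helper helper_alt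
  simp only []
  rw [filt_enumerate k str.toList 0, PySem.Str.len_eq]
  set l := str.toList with hl
  by_cases hk : 0 ≤ k ∧ k < (l.length : Int)
  · rw [if_pos (by omega)]
    rw [helperLoop_of_in l k hk.1 (((l.length : Int) - 1) - 0).toNat 0 ((l.length : Int) - 1)
        le_rfl le_rfl]
    have hcs : ((l.eraseIdx k.toNat).length : Int) = (l.length : Int) - 1 := by
      rw [List.length_eraseIdx]
      split_ifs with h
      · omega
      · omega
    have h1 : phiI k 0 = 0 := by unfold phiI; rw [if_pos hk.1]
    have h2 : phiJ k ((l.length : Int) - 1) = ((l.eraseIdx k.toNat).length : Int) - 1 := by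
      unfold phiJ
      rw [hcs]
      split_ifs <;> omega
    have h3 : (k - 0).toNat = k.toNat := by omega
    rw [h1, h2, plainLoop_pal, h3]
  · rw [if_neg (by omega)]
    rw [helperLoop_of_out l k (by omega) (((l.length : Int) - 1) - 0).toNat 0
        ((l.length : Int) - 1) le_rfl le_rfl (by omega)]
    exact plainLoop_pal l
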